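-- pv_equiv track=rewrite | github.com/luv1327/Scaler_Dsa | AdvanceDsa3/queues.py | findNthNumberPalindrome
-- ===== SOURCE A (Python) =====
-- from collections import deque
--
-- def findNthNumberPalindrome(n):
--     q = deque()
--     q.append(1)
--     q.append(2)
--     c = 0
--     while c < n:
--         front = q[0]
--         q.popleft()
--         c+=1
--         if c == n:
--             s = str(front)
--             rs = s[::-1]
--             ans = s + rs
--             return  ans
--         v1 = (front * 10) + 1
--         v2 = (front * 10) + 2
--         q.append(v1)
--         q.append(v2)
-- ===== SOURCE B (Python) =====
-- def findNthNumberPalindrome(n):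
--     # nth string over digits {1,2} in BFS order = bijective base-2 numeration of n
--     digits = []
--     while n > 0:
--         n -= 1
--         digits.append("12"[n & 1])
--         n >>= 1
--     s = "".join(reversed(digits))
--     return s + s[::-1]
-- ===== Notes on version B (the rewrite author's own statement) =====
-- stated objective: faster
-- what changed: Replaces the O(n) BFS queue simulation with a direct O(log n) bijective base-2 numeration of n into the digit string, then mirrors it.
-- outside the precondition, e.g. on findNthNumberPalindrome(0): A returns None, B returns ''
import Mathlib
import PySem

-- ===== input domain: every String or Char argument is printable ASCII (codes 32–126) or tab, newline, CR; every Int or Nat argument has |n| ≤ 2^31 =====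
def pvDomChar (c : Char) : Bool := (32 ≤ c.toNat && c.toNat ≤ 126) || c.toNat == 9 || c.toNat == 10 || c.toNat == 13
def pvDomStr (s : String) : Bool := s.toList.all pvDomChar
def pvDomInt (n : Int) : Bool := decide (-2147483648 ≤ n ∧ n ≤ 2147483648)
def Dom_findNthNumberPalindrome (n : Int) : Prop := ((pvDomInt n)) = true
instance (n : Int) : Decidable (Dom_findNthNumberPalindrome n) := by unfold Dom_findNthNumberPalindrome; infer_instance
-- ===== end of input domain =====

-- B replaces A's O(n) BFS-queue simulation by the bijective base-2 numeration of n (O(log n)).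

-- ===== PORT A =====
-- A's while-loop; fuel = n - c (c increments once per iteration, the function returns when
-- c reaches n).  "" stands for Python's implicit None when the loop exits without returning
-- (only when n ≤ 0, excluded by Pre_) and for the unreachable q[0] on an empty queue
-- (the queue never empties while the loop runs).
def pvALoop : Nat → List Int → String
  | 0, _ => ""
  | Nat.succ k, q =>
    match q with
    | [] => ""
    | front :: rest =>
      if k = 0 then
        let s := PySem.Int.toStr front
        s ++ String.mk s.toList.reverse   -- ans = s + s[::-1]  (s[::-1] reverses s; exact)
      else
        pvALoop k (rest ++ [front * 10 + 1, front * 10 + 2])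

def findNthNumberPalindrome (n : Int) : String := pvALoop n.toNat [1, 2]

-- ===== PORT B =====
-- Source B's while-loop: digits appended least-significant first; the loop state n shrinks
-- as n ← (n-1) >> 1, so it is structural recursion on the Nat value of n.
def pvBDigits : Nat → List Char
  | 0 => []
  | Nat.succ m => (if m % 2 = 0 then '1' else '2') :: pvBDigits (m / 2)
decreasing_by exact Nat.lt_succ_of_le (Nat.div_le_self m 2)

def findNthNumberPalindrome_alt (n : Int) : String :=
  let s := String.mk (pvBDigits n.toNat).reverse   -- ''.join(reversed(digits))
  s ++ String.mk s.toList.reverse                   -- s + s[::-1]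

-- ===== PRECONDITION & SPEC =====
-- Pre_ excludes n ≤ 0, where A's loop never runs and A returns None (not a str).
def Pre_findNthNumberPalindrome (n : Int) : Prop := 1 ≤ n
instance (n : Int) : Decidable (Pre_findNthNumberPalindrome n) := by
  unfold Pre_findNthNumberPalindrome; infer_instance

def pvWitness_findNthNumberPalindrome : Int := 1

def Spec_findNthNumberPalindrome (n : Int) (out : String) : Prop := out = findNthNumberPalindrome_alt n
instance (n : Int) (out : String) : Decidable (Spec_findNthNumberPalindrome n out) := by
  unfold Spec_findNthNumberPalindrome; infer_instance

-- ===== CLAIM =====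
def Claim_equal_findNthNumberPalindrome : Prop :=
  ∀ (n : Int), Dom_findNthNumberPalindrome n → Pre_findNthNumberPalindrome n →
    Spec_findNthNumberPalindrome n (findNthNumberPalindrome n)

-- ===== LEMMAS AND PROOFS =====

-- value of the k-th (1-based) BFS node: the bijective base-2 numeral of k over digits {1,2}
def pvVal : Nat → Nat
  | 0 => 0
  | Nat.succ m => pvVal (m / 2) * 10 + (m % 2 + 1)
decreasing_by exact Nat.lt_succ_of_le (Nat.div_le_self m 2)

-- decimal digit characters of n, most significant first
def pvRep (n : Nat) : List Char :=
  if n < 10 then [Nat.digitChar n]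
  else pvRep (n / 10) ++ [Nat.digitChar (n % 10)]
decreasing_by exact Nat.div_lt_self (by omega) (by omega)

lemma pvToDigitsCore_eq : ∀ (fuel n : Nat) (ds : List Char), n < fuel →
    Nat.toDigitsCore 10 fuel n ds = pvRep n ++ ds := by
  intro fuel
  induction fuel with
  | zero => intro n ds h; omega
  | succ f ih =>
    intro n ds h
    rw [Nat.toDigitsCore]
    by_cases h10 : n / 10 = 0
    · rw [if_pos h10]
      have hlt : n < 10 := by omega
      rw [pvRep, if_pos hlt, Nat.mod_eq_of_lt hlt]
      simp
    · rw [if_neg h10, ih (n / 10) ((n % 10).digitChar :: ds) (by omega)]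
      conv_rhs => rw [pvRep, if_neg (show ¬ n < 10 by omega)]
      simp

lemma pvRep_tens (a d : Nat) (ha : 1 ≤ a) (hd : d < 10) :
    pvRep (a * 10 + d) = pvRep a ++ [Nat.digitChar d] := by
  rw [pvRep, if_neg (by omega)]
  have h1 : (a * 10 + d) / 10 = a := by omega
  have h2 : (a * 10 + d) % 10 = d := by omega
  rw [h1, h2]

lemma pvVal_odd (i : Nat) : pvVal (2 * i + 1) = pvVal i * 10 + 1 := by
  show pvVal ((2 * i) + 1) = _
  rw [pvVal]
  have h1 : 2 * i / 2 = i := by omega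
  have h2 : 2 * i % 2 = 0 := by omega
  rw [h1, h2]

lemma pvVal_even (i : Nat) : pvVal (2 * i + 2) = pvVal i * 10 + 2 := by
  show pvVal ((2 * i + 1) + 1) = _
  rw [pvVal]
  have h1 : (2 * i + 1) / 2 = i := by omega
  have h2 : (2 * i + 1) % 2 = 1 := by omega
  rw [h1, h2]

lemma pvVal_pos (n : Nat) (h : 1 ≤ n) : 1 ≤ pvVal n := by
  obtain ⟨m, rfl⟩ : ∃ m, n = m + 1 := ⟨n - 1, by omega⟩
  rw [pvVal]; omega

lemma pvRep_val : ∀ n, 1 ≤ n → pvRep (pvVal n) = (pvBDigits n).reverse := by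
  intro n
  induction n using Nat.strong_induction_on with
  | _ n ih =>
    intro hn
    obtain ⟨m, rfl⟩ : ∃ m, n = m + 1 := ⟨n - 1, by omega⟩
    rw [pvVal, pvBDigits]
    by_cases hm : m / 2 = 0
    · have hm1 : m = 0 ∨ m = 1 := by omega
      rcases hm1 with rfl | rfl <;>
        simp [pvVal, pvRep, pvBDigits] <;> decide
    · rw [pvRep_tens _ _ (pvVal_pos _ (by omega)) (by omega)]
      rw [ih (m / 2) (by omega) (by omega), List.reverse_cons]
      congr 1
      rcases Nat.mod_two_eq_zero_or_one m with h | h <;> rw [h] <;> decide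

-- the BFS queue after i-1 pops: values of the consecutive node indices i, i+1, …, 2i
def pvQ (i : Nat) : List Int := (List.range' i (i + 1)).map (fun j => (pvVal j : Int))

lemma pvQ_one : pvQ 1 = [1, 2] := by
  simp [pvQ, List.range', pvVal]

lemma pvALoop_q : ∀ (k i : Nat), 1 ≤ i →
    pvALoop (k + 1) (pvQ i) =
      (PySem.Int.toStr (pvVal (i + k) : Int)) ++
        String.mk (PySem.Int.toStr (pvVal (i + k) : Int)).toList.reverse := by
  intro k
  induction k with
  | zero =>
    intro i hi
    rw [pvQ, List.range'_succ, List.map_cons, pvALoop]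
    simp
  | succ k ih =>
    intro i hi
    rw [pvQ, List.range'_succ, List.map_cons, pvALoop]
    rw [if_neg (by omega)]
    have hq : (List.range' (i + 1) i).map (fun j => (pvVal j : Int)) ++
        [(pvVal i : Int) * 10 + 1, (pvVal i : Int) * 10 + 2] = pvQ (i + 1) := by
      rw [pvQ]
      have h1 : List.range' (i + 1) (i + 1 + 1) =
          List.range' (i + 1) i ++ [2 * i + 1, 2 * i + 2] := by
        rw [List.range'_concat, List.range'_concat]
        simp only [List.append_assoc]
        have e1 : i + 1 + 1 * i = 2 * i + 1 := by omega
        have e2 : i + 1 + 1 * (i + 1) = 2 * i + 2 := by omega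
        rw [e1, e2]
        simp
      rw [h1, List.map_append]
      congr 1
      simp only [List.map_cons, List.map_nil, pvVal_odd, pvVal_even]
      push_cast
      ring_nf
    rw [hq, ih (i + 1) (by omega)]
    have e : i + 1 + k = i + (k + 1) := by omega
    rw [e]

lemma pvToStr_val (n : Nat) (hn : 1 ≤ n) :
    PySem.Int.toStr (pvVal n : Int) = String.mk (pvBDigits n).reverse := by
  rw [PySem.Int.toStr, PySem.Int.toChars]
  rw [if_neg (by omega)]
  rw [Int.toNat_natCast, Nat.toDigits]
  rw [pvToDigitsCore_eq _ _ _ (by omega)]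
  rw [pvRep_val n hn, List.append_nil]
  rfl

-- ===== VERDICT =====
theorem findNthNumberPalindrome_spec : Claim_equal_findNthNumberPalindrome := by
  intro n _ hpre
  unfold Spec_findNthNumberPalindrome findNthNumberPalindrome findNthNumberPalindrome_alt
  have h1 : (1 : Int) ≤ n := hpre
  obtain ⟨k, hk⟩ : ∃ k, n.toNat = k + 1 := ⟨n.toNat - 1, by omega⟩
  rw [hk, ← pvQ_one, pvALoop_q k 1 (le_refl 1)]
  have e : 1 + k = k + 1 := by omega
  rw [e, pvToStr_val (k + 1) (by omega)]
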